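-- pv_equiv track=rewrite | github.com/harjassand/AGI-Stack-Unchained | Extension-1/caoe_v1/sleep/operators/stability_latent_detect_v1_1.py | _group_indices
-- ===== SOURCE A (Python) =====
-- def _group_indices(max_width: int) -> list[list[int]]:
--     max_idx = min(max_width, 20)
--     groups: list[list[int]] = []
--     for start in range(0, min(max_idx, 16), 4):
--         group = list(range(start, min(start + 4, max_idx)))
--         if len(group) == 4:
--             groups.append(group)
--     return groups
-- ===== SOURCE B (Python) =====
-- _FULL_GROUPS = [[0, 1, 2, 3], [4, 5, 6, 7], [8, 9, 10, 11], [12, 13, 14, 15]]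
--
-- def _group_indices(max_width: int) -> list[list[int]]:
--     bound = min(max_width, 20)
--     return [list(g) for g in _FULL_GROUPS if g[3] < bound]
-- ===== Notes on version B (the rewrite author's own statement) =====
-- stated objective: simpler
-- what changed: B holds the only four groups that can ever appear as a static constant table and filters it by whether each group's last index is below min(max_width,20); no ranges are computed and no groups are built.
import Mathlib
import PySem

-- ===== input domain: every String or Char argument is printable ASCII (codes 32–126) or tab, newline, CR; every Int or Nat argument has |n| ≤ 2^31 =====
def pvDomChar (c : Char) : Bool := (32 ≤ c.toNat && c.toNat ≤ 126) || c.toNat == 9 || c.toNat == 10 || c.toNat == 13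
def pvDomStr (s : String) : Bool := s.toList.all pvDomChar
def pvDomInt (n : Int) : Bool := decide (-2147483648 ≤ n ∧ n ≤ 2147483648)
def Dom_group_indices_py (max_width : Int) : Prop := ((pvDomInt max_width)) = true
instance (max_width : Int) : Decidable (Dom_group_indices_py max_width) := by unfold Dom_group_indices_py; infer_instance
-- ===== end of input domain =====

-- B replaces A's range-building loop with a static table of the four possible groups,
-- filtered by the bound (objective: simpler).

-- ===== PORT A =====
def group_indices_py (max_width : Int) : List (List Int) :=
  let max_idx := min max_width 20
  (PySem.List.pyRange 0 (min max_idx 16) 4).foldl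
    (fun groups start =>
      let group := PySem.List.pyRange start (min (start + 4) max_idx) 1
      if group.length == 4 then groups ++ [group] else groups)
    []

-- ===== PORT B =====
def pvFullGroups : List (List Int) := [[0, 1, 2, 3], [4, 5, 6, 7], [8, 9, 10, 11], [12, 13, 14, 15]]

-- g[3] is ported with pyGet?; each table entry has length 4, so it is always `some`
-- (getD 0 is never the default on the table's entries).
def group_indices_py_alt (max_width : Int) : List (List Int) :=
  let bound := min max_width 20
  (pvFullGroups.filter (fun g => decide ((PySem.List.pyGet? g 3).getD 0 < bound))).map id

-- ===== PRECONDITION & SPEC =====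
def Spec_group_indices_py (max_width : Int) (out : List (List Int)) : Prop := out = group_indices_py_alt max_width
instance (max_width : Int) (out : List (List Int)) : Decidable (Spec_group_indices_py max_width out) := by unfold Spec_group_indices_py; infer_instance

-- ===== CLAIM =====
def Claim_equal_group_indices_py : Prop := ∀ (max_width : Int), Dom_group_indices_py max_width → Spec_group_indices_py max_width (group_indices_py max_width)

-- ===== LEMMAS AND PROOFS =====

lemma ge20_eq (w : Int) (h : 20 ≤ w) : group_indices_py w = group_indices_py_alt w := by
  unfold group_indices_py group_indices_py_alt
  dsimp only
  rw [show min w 20 = 20 by omega]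
  decide

lemma neg_eq (w : Int) (h : w < 0) : group_indices_py w = group_indices_py_alt w := by
  unfold group_indices_py group_indices_py_alt
  dsimp only
  have h1 : min w 20 = w := by omega
  rw [h1]
  rw [show min w 16 = w by omega]
  rw [PySem.List.pyRange_of_pos 0 w (by norm_num : (0:Int) < 4)]
  rw [if_neg (by omega : ¬ (0:Int) < w)]
  simp [pvFullGroups, List.filter, PySem.List.pyGet?, PySem.List.pyIdx?,
    show ¬(3:Int) < w by omega, show ¬(7:Int) < w by omega,
    show ¬(11:Int) < w by omega, show ¬(15:Int) < w by omega]

-- ===== VERDICT =====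
theorem group_indices_py_spec : Claim_equal_group_indices_py := by
  intro w _
  unfold Spec_group_indices_py
  rcases lt_or_ge w 0 with h | h
  · rw [neg_eq w h]
  · rcases lt_or_ge w 20 with h2 | h2
    · interval_cases w <;> decide
    · rw [ge20_eq w h2]
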